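-- pv_equiv track=rewrite | github.com/dinhgia2106/RecommendKeyboard | src/models.py | _fix_bies_sequence
-- ===== SOURCE A (Python) =====
-- from typing import List, Tuple, Dict, Set
--
-- def _fix_bies_sequence(labels: List[str]) -> List[str]:
--     """
--     Fix BIES sequence to ensure valid transitions.
--
--     Args:
--         labels: Potentially invalid BIES sequence
--
--     Returns:
--         Valid BIES sequence
--     """
--     fixed = []
--
--     for i, label in enumerate(labels):
--         if i == 0:
--             # First position can only be B or S
--             fixed.append('B' if label in ['B', 'I'] else 'S')
--         else:
--             prev_label = fixed[i-1]
--
--             if prev_label in ['B', 'I']: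
--                 # After B or I, can only have I or E
--                 fixed.append('I' if label in ['B', 'I'] else 'E')
--             else:  # prev_label in ['E', 'S']
--                 # After E or S, can only have B or S
--                 fixed.append('B' if label in ['B', 'I'] else 'S')
--
--     return fixed
-- ===== SOURCE B (Python) =====
-- from typing import List
--
--
-- def _fix_bies_sequence(labels: List[str]) -> List[str]:
--     # Run-length algorithm: split the sequence into maximal runs of
--     # "word-ish" labels (B/I) vs "boundary-ish" labels (anything else)
--     # and emit each run's canonical tagging as a whole block:
--     # a word run of length k becomes 'B' + 'I'*(k-1); a boundary run
--     # becomes 'E' + 'S'*(k-1), except the very first run, which has no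
--     # word to close and becomes 'S'*k.
--     bits = [l in ('B', 'I') for l in labels]
--     out: List[str] = []
--     while bits:
--         b = bits[0]
--         k = next((i for i, x in enumerate(bits) if x != b), len(bits))
--         if b:
--             out += ['B'] + ['I'] * (k - 1)
--         elif not out:
--             out += ['S'] * k
--         else:
--             out += ['E'] + ['S'] * (k - 1)
--         bits = bits[k:]
--     return out
-- ===== Notes on version B (the rewrite author's own statement) =====
-- stated objective: alternative
-- what changed: Replaces A's per-position state machine (each step reads the previously written output element fixed[i-1]) by a run-length algorithm: the sequence is split into maximal runs of word-ish (B/I) vs other labels and each run is emitted as one block ('B'+'I'*(k-1) for a word run, 'E'+'S'*(k-1), or 'S'*k for the leading run, for a boundary run).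
import Mathlib
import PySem

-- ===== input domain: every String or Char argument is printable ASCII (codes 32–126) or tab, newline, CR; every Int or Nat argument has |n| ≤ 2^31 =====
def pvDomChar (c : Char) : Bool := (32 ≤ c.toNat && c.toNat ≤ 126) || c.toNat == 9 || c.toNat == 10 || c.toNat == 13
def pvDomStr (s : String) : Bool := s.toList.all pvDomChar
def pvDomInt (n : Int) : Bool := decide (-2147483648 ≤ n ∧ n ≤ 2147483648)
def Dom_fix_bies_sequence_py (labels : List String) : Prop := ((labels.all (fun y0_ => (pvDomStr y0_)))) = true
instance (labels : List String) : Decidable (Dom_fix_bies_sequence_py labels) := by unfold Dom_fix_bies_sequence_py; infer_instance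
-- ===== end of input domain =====

-- B replaces A's per-position output-feedback state machine by a run-length pass:
-- maximal runs of word-ish (B/I) labels are emitted as whole blocks; same cost, no speed claim.

-- ===== PORT A =====
-- for i, label in enumerate(labels): append depending on i == 0 / fixed[i-1]
def fix_bies_sequence_py (labels : List String) : List String :=
  (PySem.List.enumerate labels).foldl
    (fun fixed il =>
      let i := il.1
      let label := il.2
      if i = 0 then
        fixed ++ [if label = "B" ∨ label = "I" then "B" else "S"]
      else
        let prev_label := PySem.List.pyGetD fixed (i - 1) ""
        if prev_label = "B" ∨ prev_label = "I" then
          fixed ++ [if label = "B" ∨ label = "I" then "I" else "E"]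
        else
          fixed ++ [if label = "B" ∨ label = "I" then "B" else "S"])
    []

-- ===== PORT B =====
-- while bits: b = bits[0]; k = first index with bits[k] != b (k = length of the leading
-- constant run, computed here as takeWhile); emit the run's block; bits = bits[k:]
def pvGoRuns (out : List String) (bits : List Bool) : List String :=
  match bits with
  | [] => out
  | b :: rest =>
    let t := rest.takeWhile (· == b)
    let k := t.length + 1
    let out' :=
      if b then out ++ ("B" :: List.replicate (k - 1) "I")
      else if out = [] then out ++ List.replicate k "S"
      else out ++ ("E" :: List.replicate (k - 1) "S")
    pvGoRuns out' (rest.dropWhile (· == b))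
termination_by bits.length
decreasing_by
  simp only [List.length_cons]
  exact Nat.lt_succ_of_le (List.length_dropWhile_le _ _)

def fix_bies_sequence_py_alt (labels : List String) : List String :=
  pvGoRuns [] (labels.map (fun l => l = "B" || l = "I"))

-- ===== PRECONDITION & SPEC =====
def Spec_fix_bies_sequence_py (labels : List String) (out : List String) : Prop := out = fix_bies_sequence_py_alt labels
instance (labels : List String) (out : List String) : Decidable (Spec_fix_bies_sequence_py labels out) := by unfold Spec_fix_bies_sequence_py; infer_instance

-- ===== CLAIM (what is proved, stated in full; the proofs are below) =====
def Claim_equal_fix_bies_sequence_py : Prop := ∀ (labels : List String), Dom_fix_bies_sequence_py labels → Spec_fix_bies_sequence_py labels (fix_bies_sequence_py labels)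

-- ===== LEMMAS AND PROOFS =====

-- A's loop body, beta-reduced (definitionally equal to the lambda in the port)
def pvStep (fixed : List String) (il : Int × String) : List String :=
  if il.1 = 0 then fixed ++ [if il.2 = "B" ∨ il.2 = "I" then "B" else "S"]
  else
    if PySem.List.pyGetD fixed (il.1 - 1) "" = "B" ∨ PySem.List.pyGetD fixed (il.1 - 1) "" = "I" then
      fixed ++ [if il.2 = "B" ∨ il.2 = "I" then "I" else "E"]
    else
      fixed ++ [if il.2 = "B" ∨ il.2 = "I" then "B" else "S"]

lemma pvA_eq_step (labels : List String) :
    fix_bies_sequence_py labels = (PySem.List.enumerate labels).foldl pvStep [] := rfl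

-- reference machine: emit the tag for each bit given the previous bit
def pvGo (p : Bool) : List Bool → List String
  | [] => []
  | cur :: cs =>
    (if p then (if cur then "I" else "E") else (if cur then "B" else "S")) :: pvGo cur cs

lemma pvA_fold (ls : List String) : ∀ (fixed : List String) (p : Bool),
    fixed ≠ [] →
    ((fixed.getLast? = some "B" ∨ fixed.getLast? = some "I") ↔ p = true) →
    (PySem.List.enumerate ls (fixed.length : Int)).foldl pvStep fixed
      = fixed ++ pvGo p (ls.map (fun l => l = "B" || l = "I")) := by
  induction ls with
  | nil => intro fixed p _ _; simp [PySem.List.enumerate, pvGo]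
  | cons l ls ih =>
    intro fixed p hne hp
    rw [PySem.List.enumerate_cons, List.foldl_cons]
    have hlen : fixed.length ≠ 0 := by
      simpa [List.length_eq_zero_iff] using hne
    have hi : (fixed.length : Int) ≠ 0 := by exact_mod_cast hlen
    have hprev : PySem.List.pyGetD fixed ((fixed.length : Int) - 1) "" = fixed.getLast hne := by
      have h1 : ((fixed.length : Int) - 1) = ((fixed.length - 1 : Nat) : Int) := by omega
      rw [h1, PySem.List.pyGetD_natCast, List.getD_eq_getElem?_getD,
        List.getElem?_eq_getElem (by omega), List.getLast_eq_getElem]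
      simp
    have hiff : (fixed.getLast hne = "B" ∨ fixed.getLast hne = "I") ↔ p = true := by
      rw [List.getLast?_eq_some_getLast hne] at hp
      simpa only [Option.some.injEq] using hp
    set x : String :=
      if p = true then (if l = "B" ∨ l = "I" then "I" else "E")
      else (if l = "B" ∨ l = "I" then "B" else "S") with hx
    have hacc : pvStep fixed ((fixed.length : Int), l) = fixed ++ [x] := by
      simp only [pvStep]
      rw [if_neg hi, hprev]
      by_cases hpv : p = true
      · rw [if_pos (hiff.mpr hpv), hx, if_pos hpv]
      · rw [if_neg (fun h => hpv (hiff.mp h)), hx, if_neg hpv]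
    have hlast' : ((fixed ++ [x]).getLast? = some "B" ∨ (fixed ++ [x]).getLast? = some "I")
        ↔ (l = "B" || l = "I") = true := by
      rw [List.getLast?_concat]
      simp only [Option.some.injEq, hx]
      by_cases hpv : p = true <;> by_cases hl : l = "B" ∨ l = "I" <;>
        simp [hpv, hl]
    have hlen' : ((fixed.length : Int) + 1) = (((fixed ++ [x]).length : Nat) : Int) := by simp
    rw [hacc, hlen', ih (fixed ++ [x]) (l = "B" || l = "I") (by simp) hlast']
    have hgo : pvGo p (List.map (fun l => l = "B" || l = "I") (l :: ls))
        = x :: pvGo (l = "B" || l = "I") (ls.map (fun l => l = "B" || l = "I")) := by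
      simp only [List.map_cons, pvGo]
      congr 1
      by_cases hpv : p = true <;> by_cases hl : l = "B" ∨ l = "I" <;>
        simp [hx, hpv, hl]
    rw [hgo]
    simp

-- A equals the reference machine started with "previous bit = false"
lemma pvA_eq_go (labels : List String) :
    fix_bies_sequence_py labels = pvGo false (labels.map (fun l => l = "B" || l = "I")) := by
  rw [pvA_eq_step]
  cases labels with
  | nil => rfl
  | cons l ls =>
    rw [PySem.List.enumerate_cons, List.foldl_cons]
    have hacc0 : pvStep [] ((0 : Int), l) = [if l = "B" ∨ l = "I" then "B" else "S"] := by
      simp [pvStep]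
    set x0 : String := if l = "B" ∨ l = "I" then "B" else "S" with hx0
    have h0 : ((0 : Int) + 1) = ((([x0] : List String).length : Nat) : Int) := by simp
    rw [hacc0, h0, pvA_fold ls [x0] (l = "B" || l = "I") (by simp)
      (by
        rw [List.getLast?_singleton]
        simp only [Option.some.injEq, hx0]
        by_cases hl : l = "B" ∨ l = "I" <;> simp [hl])]
    have hgo : pvGo false (List.map (fun l => l = "B" || l = "I") (l :: ls))
        = x0 :: pvGo (l = "B" || l = "I") (ls.map (fun l => l = "B" || l = "I")) := by
      simp only [List.map_cons, pvGo]
      congr 1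
      by_cases hl : l = "B" ∨ l = "I" <;> simp [hx0, hl]
    rw [hgo]
    simp

-- the reference machine with previous bit b maps a constant-b prefix to its inside tag
lemma pvGo_const (b : Bool) : ∀ (t d : List Bool), (∀ x ∈ t, x = b) →
    pvGo b (t ++ d) = List.replicate t.length (if b then "I" else "S") ++ pvGo b d := by
  intro t
  induction t with
  | nil => intro d _; simp
  | cons x xs ih =>
    intro d hall
    have hx : x = b := hall x (by simp)
    subst hx
    simp only [List.cons_append, pvGo, List.length_cons, List.replicate_succ, List.cons_append]
    rw [ih d (fun y hy => hall y (by simp [hy]))]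
    cases x <;> simp

-- the head of a dropWhile fails the predicate
lemma pvDropWhile_head {α : Type} (q : α → Bool) : ∀ (l : List α) (b : α) (r : List α),
    l.dropWhile q = b :: r → q b = false := by
  intro l
  induction l with
  | nil => intro b r h; simp [List.dropWhile] at h
  | cons x xs ih =>
    intro b r h
    rw [List.dropWhile_cons] at h
    by_cases hx : q x = true
    · rw [if_pos hx] at h; exact ih b r h
    · rw [if_neg hx] at h
      cases h
      simpa using hx

-- the run-length pass computes the reference machine's output
lemma pvGoRuns_eq : ∀ (n : Nat) (bits : List Bool), bits.length ≤ n → ∀ (out : List String) (p : Bool),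
    (out = [] → p = false) →
    (∀ b rest, bits = b :: rest → out ≠ [] → p = !b) →
    pvGoRuns out bits = out ++ pvGo p bits := by
  intro n
  induction n with
  | zero =>
    intro bits hlen out p _ _
    rw [List.length_eq_zero_iff.mp (Nat.le_zero.mp hlen)]
    simp [pvGoRuns, pvGo]
  | succ n ih =>
    intro bits hlen out p hp0 hp1
    cases bits with
    | nil => simp [pvGoRuns, pvGo]
    | cons b rest =>
      have hsplit : rest = rest.takeWhile (· == b) ++ rest.dropWhile (· == b) :=
        (List.takeWhile_append_dropWhile).symm
      have htag : (if p then (if b then "I" else "E") else (if b then "B" else "S"))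
          = (if b then "B" else if out = [] then "S" else "E") := by
        by_cases hout : out = []
        · rw [hp0 hout]; cases b <;> simp [hout]
        · rw [hp1 b rest rfl hout]; cases b <;> simp [hout]
      have hgo1 : pvGo p (b :: rest)
          = (if b then "B" else if out = [] then "S" else "E")
            :: (List.replicate (rest.takeWhile (· == b)).length (if b then "I" else "S")
              ++ pvGo b (rest.dropWhile (· == b))) := by
        conv_lhs => rw [pvGo, hsplit]
        rw [pvGo_const b _ _ (fun x hx => by simpa using List.mem_takeWhile_imp hx), htag]
      have hout' : ∀ out' : List String,
          (out' = (if b then out ++ ("B" :: List.replicate (rest.takeWhile (· == b)).length "I")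
            else if out = [] then out ++ List.replicate ((rest.takeWhile (· == b)).length + 1) "S"
            else out ++ ("E" :: List.replicate (rest.takeWhile (· == b)).length "S"))) →
          out' = out ++ (if b then "B" else if out = [] then "S" else "E")
            :: List.replicate (rest.takeWhile (· == b)).length (if b then "I" else "S") := by
        intro out' h
        subst h
        by_cases hb : b = true
        · simp [hb]
        · rw [Bool.not_eq_true] at hb
          subst hb
          by_cases hout : out = [] <;> simp [hout, List.replicate_succ]
      have hd : (rest.dropWhile (· == b)).length ≤ n := by
        have h1 := List.length_dropWhile_le (· == b) rest
        simp only [List.length_cons] at hlen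
        omega
      rw [pvGoRuns]
      simp only [Nat.add_sub_cancel]
      rw [ih (rest.dropWhile (· == b)) hd _ b
        (by
          intro h
          exfalso
          by_cases hb : b = true <;> by_cases hout : out = [] <;>
            simp [hb, hout] at h)
        (by
          intro b' rest' hdrop _
          have hqb := pvDropWhile_head (· == b) rest b' rest' hdrop
          revert hqb
          cases b <;> cases b' <;> simp)]
      rw [hout' _ rfl]
      rw [hgo1]
      simp

-- ===== VERDICT (by name: the statement is the Claim_ definition above) =====
theorem fix_bies_sequence_py_spec : Claim_equal_fix_bies_sequence_py := by
  intro labels _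
  unfold Spec_fix_bies_sequence_py
  rw [pvA_eq_go, fix_bies_sequence_py_alt,
    pvGoRuns_eq (labels.map (fun l => l = "B" || l = "I")).length _ le_rfl [] false
      (fun _ => rfl) (fun _ _ _ h => absurd rfl h)]
  simp
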